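-- pv_equiv track=rewrite | github.com/aldotb/Algebra-Math-Symbolic-Biblie | Libaldo/lib_MyFunctions.py | find_simetric_end_par
-- ===== SOURCE A (Python) =====
-- def find_simetric_end_par(expr,p1):
--     sexpr=str(expr)
--     p2=find_first_par_from(str(expr),p1)
--     done=True
--     qbal=1
--     p3=p2+1
--     while done:
--         if sexpr[p3]=='(':
--             qbal=qbal+1
--         if sexpr[p3]==')':
--             qbal=qbal-1
--         if qbal==0:
--             return p2,p3
--         else:
--             p3=p3+1
--
-- def find_first_par_from(sexpr,p1):
--     sres='('
--     done=True
--     while done: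
--         svar=sexpr[p1]
--         if svar=='(':
--             return p1
--         else:
--             p1=p1+1
-- ===== SOURCE B (Python) =====
-- def find_simetric_end_par(expr, p1):
--     sexpr = str(expr)
--     stack = []
--     i = p1
--     while True:
--         c = sexpr[i]
--         if c == '(':
--             stack.append(i)
--         elif c == ')' and stack:
--             if len(stack) == 1:
--                 return stack[0], i
--             stack.pop()
--         i += 1
-- ===== Notes on version B (the rewrite author's own statement) =====
-- stated objective: idiomatic
-- what changed: A's two-function design (a helper scanning for the first '(' followed by a while loop over an integer balance counter) is merged into one self-contained single-pass loop that keeps a stack of open-parenthesis positions and returns (first pushed position, current index) when the stack empties.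
import Mathlib
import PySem

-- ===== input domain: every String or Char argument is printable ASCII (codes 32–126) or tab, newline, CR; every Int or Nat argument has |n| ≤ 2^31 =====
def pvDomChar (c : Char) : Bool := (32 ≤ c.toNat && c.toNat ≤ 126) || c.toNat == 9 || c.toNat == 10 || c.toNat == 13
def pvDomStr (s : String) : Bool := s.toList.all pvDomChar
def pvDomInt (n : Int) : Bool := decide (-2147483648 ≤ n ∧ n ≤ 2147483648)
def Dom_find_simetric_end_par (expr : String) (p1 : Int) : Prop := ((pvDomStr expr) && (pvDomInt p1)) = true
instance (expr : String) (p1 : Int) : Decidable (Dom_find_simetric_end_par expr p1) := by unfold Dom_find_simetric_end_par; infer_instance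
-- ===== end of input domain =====

-- B merges A's two-function design (first scan for '(', then a counter loop) into one pass
-- keeping a stack of open-paren positions; objective: idiomatic, same cost.

-- an index pyGet? accepts is < length (cited by the loops' decreasing_by)
theorem pv_lt_of_pyGet?_eq_some {s : List Char} {i : Int} {c : Char}
    (h : PySem.List.pyGet? s i = some c) : i < (s.length : Int) := by
  by_contra hlt
  have : PySem.List.pyGet? s i = none := by
    rw [PySem.List.pyGet?_eq_none_iff]; intro hin; exact hlt hin.2
  simp [this] at h

-- ===== PORT A =====
-- helper find_first_par_from: scan from p1 until '(' (none = IndexError)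
def pvFfpfA (s : List Char) (p1 : Int) : Option Int :=
  match h : PySem.List.pyGet? s p1 with
  | none => none
  | some svar => if svar = '(' then some p1 else pvFfpfA s (p1 + 1)
termination_by ((s.length : Int) - p1).toNat
decreasing_by have := pv_lt_of_pyGet?_eq_some h; omega

-- A's main while loop: balance counter qbal, position p3 (none = IndexError)
def pvLoopA (s : List Char) (p2 p3 qbal : Int) : Option (Int × Int) :=
  match h : PySem.List.pyGet? s p3 with
  | none => none
  | some c =>
    let q1 := if c = '(' then qbal + 1 else qbal
    let q2 := if c = ')' then q1 - 1 else q1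
    if q2 = 0 then some (p2, p3) else pvLoopA s p2 (p3 + 1) q2
termination_by ((s.length : Int) - p3).toNat
decreasing_by have := pv_lt_of_pyGet?_eq_some h; omega

def find_simetric_end_par (expr : String) (p1 : Int) : Int × Int :=
  let sexpr := expr.toList
  match pvFfpfA sexpr p1 with
  | none => (0, 0)          -- IndexError in Python; excluded by Pre_
  | some p2 => (pvLoopA sexpr p2 (p2 + 1) 1).getD (0, 0)

-- ===== PORT B =====
-- single pass keeping a stack of '(' positions; return (first pushed, current) when it empties
def pvLoopB (s : List Char) (stack : List Int) (i : Int) : Option (Int × Int) :=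
  match h : PySem.List.pyGet? s i with
  | none => none
  | some c =>
    if c = '(' then pvLoopB s (i :: stack) (i + 1)
    else
      match stack with
      | [] => pvLoopB s [] (i + 1)
      | q :: rest =>
        if c = ')' then
          if rest = [] then some (q, i) else pvLoopB s rest (i + 1)
        else pvLoopB s (q :: rest) (i + 1)
termination_by ((s.length : Int) - i).toNat
decreasing_by
  all_goals have := pv_lt_of_pyGet?_eq_some h
  all_goals omega

def find_simetric_end_par_alt (expr : String) (p1 : Int) : Int × Int :=
  (pvLoopB expr.toList [] p1).getD (0, 0)

-- ===== PRECONDITION & SPEC =====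
-- the character sequence A's indices visit: s[p1:] for p1 ≥ 0, s[len+p1:] ++ s for -len ≤ p1 < 0
def pvScanned (s : List Char) (p1 : Int) : List Char :=
  if 0 ≤ p1 then s.drop p1.toNat
  else if -(s.length : Int) ≤ p1 then s.drop ((s.length : Int) + p1).toNat ++ s
  else []

-- exactly the inputs on which the Python A returns (elsewhere it raises IndexError):
-- some visited character is '(' and, from the first such one, the parenthesis balance reaches 0
def Pre_find_simetric_end_par (expr : String) (p1 : Int) : Prop :=
  let t := (pvScanned expr.toList p1).dropWhile (· ≠ '(')
  t ≠ [] ∧ ∃ j < t.length, (t.take (j + 1)).count '(' = (t.take (j + 1)).count ')'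
instance (expr : String) (p1 : Int) : Decidable (Pre_find_simetric_end_par expr p1) := by
  unfold Pre_find_simetric_end_par; infer_instance

def pvWitness_find_simetric_end_par : String × Int := ("(a)", 0)

def Spec_find_simetric_end_par (expr : String) (p1 : Int) (out : Int × Int) : Prop := out = find_simetric_end_par_alt expr p1
instance (expr : String) (p1 : Int) (out : Int × Int) : Decidable (Spec_find_simetric_end_par expr p1 out) := by unfold Spec_find_simetric_end_par; infer_instance

-- ===== CLAIM (what is proved, stated in full; the proofs are below) =====
def Claim_equal_find_simetric_end_par : Prop := ∀ (expr : String) (p1 : Int), Dom_find_simetric_end_par expr p1 → Pre_find_simetric_end_par expr p1 → Spec_find_simetric_end_par expr p1 (find_simetric_end_par expr p1)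

-- ===== LEMMAS AND PROOFS =====

-- one-step unfolding lemmas (the definitions use a dependent match for termination)
theorem pvLoopA_none {s : List Char} {p2 p3 qbal : Int} (h : PySem.List.pyGet? s p3 = none) :
    pvLoopA s p2 p3 qbal = none := by rw [pvLoopA]; split <;> simp_all

theorem pvLoopA_some {s : List Char} {p2 p3 qbal : Int} {c : Char}
    (h : PySem.List.pyGet? s p3 = some c) :
    pvLoopA s p2 p3 qbal =
      (let q1 := if c = '(' then qbal + 1 else qbal
       let q2 := if c = ')' then q1 - 1 else q1
       if q2 = 0 then some (p2, p3) else pvLoopA s p2 (p3 + 1) q2) := by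
  rw [pvLoopA]; split <;> simp_all

theorem pvLoopA_open {s : List Char} {p2 p3 qbal : Int}
    (h : PySem.List.pyGet? s p3 = some '(') :
    pvLoopA s p2 p3 qbal =
      if qbal + 1 = 0 then some (p2, p3) else pvLoopA s p2 (p3 + 1) (qbal + 1) := by
  rw [pvLoopA_some h]; simp

theorem pvLoopA_close {s : List Char} {p2 p3 qbal : Int}
    (h : PySem.List.pyGet? s p3 = some ')') :
    pvLoopA s p2 p3 qbal =
      if qbal - 1 = 0 then some (p2, p3) else pvLoopA s p2 (p3 + 1) (qbal - 1) := by
  rw [pvLoopA_some h]; simp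

theorem pvLoopA_other {s : List Char} {p2 p3 qbal : Int} {c : Char}
    (h : PySem.List.pyGet? s p3 = some c) (h1 : c ≠ '(') (h2 : c ≠ ')') :
    pvLoopA s p2 p3 qbal =
      if qbal = 0 then some (p2, p3) else pvLoopA s p2 (p3 + 1) qbal := by
  rw [pvLoopA_some h]; simp [h1, h2]

theorem pvLoopB_none {s : List Char} {stack : List Int} {i : Int}
    (h : PySem.List.pyGet? s i = none) : pvLoopB s stack i = none := by
  rw [pvLoopB]; split <;> simp_all

theorem pvLoopB_some {s : List Char} {stack : List Int} {i : Int} {c : Char}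
    (h : PySem.List.pyGet? s i = some c) :
    pvLoopB s stack i =
      (if c = '(' then pvLoopB s (i :: stack) (i + 1)
       else
         match stack with
         | [] => pvLoopB s [] (i + 1)
         | q :: rest =>
           if c = ')' then
             if rest = [] then some (q, i) else pvLoopB s rest (i + 1)
           else pvLoopB s (q :: rest) (i + 1)) := by
  rw [pvLoopB]; split <;> simp_all

-- B's loop with an empty stack behaves like A's search for the first '('
theorem pvLoopB_nil (s : List Char) (i : Int) :
    pvLoopB s [] i =
      match pvFfpfA s i with
      | none => none
      | some p2 => pvLoopB s [p2] (p2 + 1) := by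
  fun_induction pvFfpfA s i with
  | case1 p1 h => rw [pvLoopB_none h]
  | case2 p1 h => rw [pvLoopB_some h]; simp
  | case3 p1 c h hc ih => rw [pvLoopB_some h, if_neg hc]; exact ih

-- B's loop with a nonempty stack (bottom q, height st.length + 1) is A's counter loop
theorem pvLoopB_loopA (k : Nat) (s : List Char) (q : Int) (i : Int) (st : List Int)
    (hk : ((s.length : Int) - i).toNat = k) :
    pvLoopB s (st ++ [q]) i = pvLoopA s q i ((st.length : Int) + 1) := by
  induction k using Nat.strong_induction_on generalizing i st with
  | _ k ih =>
    cases h : PySem.List.pyGet? s i with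
    | none => rw [pvLoopB_none h, pvLoopA_none h]
    | some c =>
      have hlt := pv_lt_of_pyGet?_eq_some h
      have hlen : (0 : Int) ≤ (st.length : Int) := by positivity
      rw [pvLoopB_some h]
      by_cases hc : c = '('
      · -- push: stack grows, counter increments
        subst hc
        rw [pvLoopA_open h, if_pos rfl, if_neg (by omega)]
        have hb : (i :: (st ++ [q])) = (i :: st) ++ [q] := rfl
        have hm : ((s.length : Int) - (i + 1)).toNat < k := by omega
        rw [hb, ih _ hm (i + 1) (i :: st) rfl]
        push_cast [List.length_cons]
        ring_nf
      · rw [if_neg hc]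
        by_cases hcr : c = ')'
        · -- pop (return when the stack empties, i.e. the counter hits 0)
          subst hcr
          rw [pvLoopA_close h]
          cases st with
          | nil => simp
          | cons a rest =>
            have h0 : (((a :: rest).length : Int) + 1) - 1 ≠ 0 := by push_cast [List.length_cons]; omega
            rw [if_neg h0]
            simp only [List.cons_append]
            have hne : rest ++ [q] ≠ [] := by simp
            have hm : ((s.length : Int) - (i + 1)).toNat < k := by omega
            rw [if_neg hne, ih _ hm (i + 1) rest rfl]
            push_cast [List.length_cons]
            ring_nf
        · -- any other character: both sides just advance
          rw [pvLoopA_other h hc hcr, if_neg (by omega)]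
          cases st with
          | nil =>
            simp only [List.nil_append, if_neg hcr]
            have hm : ((s.length : Int) - (i + 1)).toNat < k := by omega
            have := ih _ hm (i + 1) ([] : List Int) rfl
            simpa using this
          | cons a rest =>
            simp only [List.cons_append, if_neg hcr]
            have hm : ((s.length : Int) - (i + 1)).toNat < k := by omega
            have := ih _ hm (i + 1) (a :: rest) rfl
            simpa using this

-- the two ports agree on every input (A's raising inputs map to the shared default)
theorem pv_eq_all (expr : String) (p1 : Int) :
    find_simetric_end_par expr p1 = find_simetric_end_par_alt expr p1 := by
  unfold find_simetric_end_par find_simetric_end_par_alt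
  rw [pvLoopB_nil]
  cases h : pvFfpfA expr.toList p1 with
  | none => simp [h]
  | some p2 =>
    simp only [h]
    have := pvLoopB_loopA ((expr.toList.length : Int) - (p2 + 1)).toNat expr.toList p2 (p2 + 1) [] rfl
    simp only [List.nil_append, List.length_nil, Nat.cast_zero, Int.zero_add] at this
    rw [this]

-- ===== VERDICT (by name: the statement is the Claim_ definition above) =====
theorem find_simetric_end_par_spec : Claim_equal_find_simetric_end_par := by
  intro expr p1 _ _
  unfold Spec_find_simetric_end_par
  exact pv_eq_all expr p1
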